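-- pv_equiv track=rewrite | github.com/GraysonSpidle/list-permutations | needs_name.py | generate_transform_indices
-- ===== SOURCE A (Python) =====
-- from operator import mul
-- from functools import reduce
--
-- def g(n):
--     ''' Number of paths in the raw series. '''
--     if 0 < n < 3:
--         return n - 1
--     return sum(reduce(mul, range(3 + i, n), 1) for i in range(1, n - 2)) + 3 * reduce(mul, range(3, n), 1)
--
-- def depth(n, i):
--     ''' Returns the depth of the path at index i. Do not put 0 for i, as it will always return an incorrect number. '''
--     I = (i - 1) % g(n - 1)
--     if I and n > 3:
--         return 1 + depth(n - 1, I)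
--     return 0
--
-- def normalize(n, i):
--     ''' Transforms the i value to its equivalent i value under the first header in the list diagram. '''
--     return i - ((i - 1) // g(n)) * g(n)
--
-- def normalize_to(n, i, to):
--     ''' performs normalize(n, i) until n = to '''
--     if n < to:
--         return None
--     elif n == to:
--         return normalize(to, i)
--     return normalize_to(n - 1, normalize(n, i), to)
--
-- def generate_transform_indices(n, i):
--     ''' Returns a generator that spits out transformation indices for us to use on the
--     initial path so we can make the path at index i.
--      '''
--     if i < 1: # 0 is the initial path and any negative number is undefined
--         return None
--     d = depth(n, i)
--     yield (i - 1) // g(n - 1) # the first index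
--     if n > 4:
--         if d >= 1: # all other indices
--             # k is the index of the generated output we are on
--             for k in range(1, min(d + 1, (n - 3))):
--                 l = (normalize_to(n, i - (k - 1), n - k) - 2)
--                 yield l // g(n - (k + 1))
--         if d == n - 3: # the last index for the deepest paths
--             yield int(d == depth(n, i - 1))
--     elif n == 4:
--         if d == 1:
--             yield int(d == depth(n, i - 1))
-- ===== SOURCE B (Python) =====
-- def generate_transform_indices(n, i):
--     ''' Same transformation indices as A, but g is tabulated once via the
--     first-order recurrence g(m) = (m-1)*g(m-1) + 1 (g(1)=0, g(m)=3 for m<=0),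
--     and depth / normalize_to become iterative loops over that table. '''
--     if i < 1:
--         return
--     # g table: G[m] = g(m) for 0 <= m <= max(n, 1)
--     G = [3, 0]
--     v = 0
--     for m in range(2, n + 1):
--         v = (m - 1) * v + 1
--         G.append(v)
--
--     def gv(m):
--         return G[m] if m > 0 else 3
--
--     def depth(n0, j):
--         d = 0
--         I = (j - 1) % gv(n0 - 1)
--         while I and n0 > 3:
--             n0 -= 1
--             d += 1
--             I = (I - 1) % gv(n0 - 1)
--         return d
--
--     def norm_to(n0, j, to):
--         while n0 >= to:
--             j = (j - 1) % gv(n0) + 1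
--             n0 -= 1
--         return j
--
--     d = depth(n, i)
--     yield (i - 1) // gv(n - 1)
--     if n > 4:
--         for k in range(1, min(d + 1, n - 3)):
--             yield (norm_to(n, i - (k - 1), n - k) - 2) // gv(n - k - 1)
--         if d == n - 3:
--             yield int(d == depth(n, i - 1))
--     elif n == 4:
--         if d == 1:
--             yield int(d == depth(n, i - 1))
-- ===== Notes on version B (the rewrite author's own statement) =====
-- stated objective: faster
-- what changed: B computes g once as a table via the first-order recurrence g(m) = (m-1)*g(m-1) + 1 instead of A's nested product-sum formula re-evaluated inside every depth/normalize call, and replaces the recursive depth/normalize_to by iterative loops over that table.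
import Mathlib
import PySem

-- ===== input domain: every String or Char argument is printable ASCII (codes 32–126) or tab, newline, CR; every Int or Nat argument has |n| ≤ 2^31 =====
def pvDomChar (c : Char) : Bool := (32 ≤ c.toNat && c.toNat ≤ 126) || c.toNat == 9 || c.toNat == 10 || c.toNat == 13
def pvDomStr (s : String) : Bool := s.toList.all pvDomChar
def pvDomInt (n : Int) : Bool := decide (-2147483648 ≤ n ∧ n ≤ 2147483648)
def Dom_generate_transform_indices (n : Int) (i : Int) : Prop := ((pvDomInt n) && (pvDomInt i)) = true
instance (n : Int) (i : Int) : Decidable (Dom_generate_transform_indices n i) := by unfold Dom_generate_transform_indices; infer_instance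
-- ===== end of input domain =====

-- B tabulates g once via the recurrence g(m) = (m-1)*g(m-1) + 1 and replaces the
-- recursive depth/normalize_to by loops over that table (measured asymptotically faster).

-- ===== PORT A =====
-- reduce(mul, range(a, b), 1)
def pvProdA (a b : Int) : Int := (PySem.List.pyRange a b 1).foldl (· * ·) 1

-- g(n)
def gA (n : Int) : Int :=
  if 0 < n ∧ n < 3 then n - 1
  else ((PySem.List.pyRange 1 (n - 2) 1).map (fun i => pvProdA (3 + i) n)).sum + 3 * pvProdA 3 n

-- depth(n, i)
def depthA (n i : Int) : Int :=
  let I := PySem.Int.mod (i - 1) (gA (n - 1))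
  if I ≠ 0 ∧ 3 < n then 1 + depthA (n - 1) I else 0
termination_by (n - 3).toNat
decreasing_by omega

-- normalize(n, i)
def normalizeA (n i : Int) : Int := i - (PySem.Int.floordiv (i - 1) (gA n)) * (gA n)

-- normalize_to(n, i, t); none = Python's None
def normalize_toA (n i t : Int) : Option Int :=
  if n < t then none
  else if n = t then some (normalizeA t i)
  else normalize_toA (n - 1) (normalizeA n i) t
termination_by (n - t).toNat
decreasing_by omega

def generate_transform_indices (n : Int) (i : Int) : List Int :=
  if i < 1 then []
  else
    let d := depthA n i
    let first := PySem.Int.floordiv (i - 1) (gA (n - 1))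
    if 4 < n then
      first ::
        ((if 1 ≤ d then
            (PySem.List.pyRange 1 (min (d + 1) (n - 3)) 1).map (fun k =>
              -- .getD 0: the None branch of normalize_to is unreachable here (n - k < n)
              let l := (normalize_toA n (i - (k - 1)) (n - k)).getD 0 - 2
              PySem.Int.floordiv l (gA (n - (k + 1))))
          else []) ++
         (if d = n - 3 then [if d = depthA n (i - 1) then 1 else 0] else []))
    else if n = 4 then
      first :: (if d = 1 then [if d = depthA n (i - 1) then 1 else 0] else [])
    else [first]

-- ===== PORT B =====
-- the table build loop: state (G, v)
def gTableB (n : Int) : List Int × Int :=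
  (PySem.List.pyRange 2 (n + 1) 1).foldl
    (fun s m => (s.1 ++ [(m - 1) * s.2 + 1], (m - 1) * s.2 + 1)) ([3, 0], 0)

-- gv(m); .getD 0: IndexError unreachable (every call site has m ≤ max n 1 < len G)
def gvB (G : List Int) (m : Int) : Int := if 0 < m then (PySem.List.pyGet? G m).getD 0 else 3

-- the while-loop of B's depth
def depthAuxB (G : List Int) (n0 I d : Int) : Int :=
  if I ≠ 0 ∧ 3 < n0 then depthAuxB G (n0 - 1) (PySem.Int.mod (I - 1) (gvB G (n0 - 2))) (d + 1) else d
termination_by (n0 - 3).toNat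
decreasing_by omega

def depthB (G : List Int) (n0 j : Int) : Int :=
  depthAuxB G n0 (PySem.Int.mod (j - 1) (gvB G (n0 - 1))) 0

-- the while-loop of B's norm_to
def normToB (G : List Int) (n0 j t : Int) : Int :=
  if t ≤ n0 then normToB G (n0 - 1) (PySem.Int.mod (j - 1) (gvB G n0) + 1) t else j
termination_by (n0 - t + 1).toNat
decreasing_by omega

def generate_transform_indices_alt (n : Int) (i : Int) : List Int :=
  if i < 1 then []
  else
    let G := (gTableB n).1
    let d := depthB G n i
    let first := PySem.Int.floordiv (i - 1) (gvB G (n - 1))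
    if 4 < n then
      first ::
        ((PySem.List.pyRange 1 (min (d + 1) (n - 3)) 1).map (fun k =>
            PySem.Int.floordiv (normToB G n (i - (k - 1)) (n - k) - 2) (gvB G (n - k - 1))) ++
         (if d = n - 3 then [if d = depthB G n (i - 1) then 1 else 0] else []))
    else if n = 4 then
      first :: (if d = 1 then [if d = depthB G n (i - 1) then 1 else 0] else [])
    else [first]

-- ===== PRECONDITION & SPEC =====
-- Pre_ excludes exactly the inputs where A raises ZeroDivisionError (g(1) = 0): n = 2 with i ≥ 1.
def Pre_generate_transform_indices (n : Int) (i : Int) : Prop := ¬ (n = 2 ∧ 1 ≤ i)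
instance (n : Int) (i : Int) : Decidable (Pre_generate_transform_indices n i) := by
  unfold Pre_generate_transform_indices; infer_instance

def pvWitness_generate_transform_indices : Int × Int := (6, 25)

def Spec_generate_transform_indices (n : Int) (i : Int) (out : List Int) : Prop :=
  out = generate_transform_indices_alt n i
instance (n : Int) (i : Int) (out : List Int) : Decidable (Spec_generate_transform_indices n i out) := by
  unfold Spec_generate_transform_indices; infer_instance

-- ===== CLAIM (what is proved, stated in full; the proofs are below) =====
def Claim_equal_generate_transform_indices : Prop :=
  ∀ (n : Int) (i : Int), Dom_generate_transform_indices n i →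
    Pre_generate_transform_indices n i →
    Spec_generate_transform_indices n i (generate_transform_indices n i)

-- ===== LEMMAS AND PROOFS =====

-- mathematical reference: g by its first-order recurrence
def gN : Nat → Int
  | 0 => 3
  | 1 => 0
  | (k + 2) => ((k + 1 : Nat) : Int) * gN (k + 1) + 1

def gZ (m : Int) : Int := if m ≤ 0 then 3 else gN m.toNat

lemma gZ_succ (m : Int) (h : 1 ≤ m) : gZ (m + 1) = m * gZ m + 1 := by
  unfold gZ
  rw [if_neg (by omega), if_neg (by omega)]
  obtain ⟨k, hk⟩ : ∃ k : Nat, m = (k : Int) + 1 := ⟨(m - 1).toNat, by omega⟩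
  subst hk
  have h1 : ((k : Int) + 1 + 1).toNat = k + 2 := by omega
  have h2 : ((k : Int) + 1).toNat = k + 1 := by omega
  rw [h1, h2]
  show ((k + 1 : Nat) : Int) * gN (k + 1) + 1 = _
  push_cast
  ring

lemma pvProdA_succ (a b : Int) (h : a ≤ b) : pvProdA a (b + 1) = pvProdA a b * b := by
  unfold pvProdA
  rw [PySem.List.pyRange_one_succ_right h, List.foldl_append]
  rfl

lemma pvProdA_self (a : Int) : pvProdA a a = 1 := by
  unfold pvProdA
  rw [PySem.List.pyRange_one_eq_nil le_rfl]
  rfl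

lemma gA_succ (m : Int) (h : 3 ≤ m) : gA (m + 1) = m * gA m + 1 := by
  have hb1 : ¬ (0 < m + 1 ∧ m + 1 < 3) := by omega
  have hb2 : ¬ (0 < m ∧ m < 3) := by omega
  rw [gA, gA, if_neg hb1, if_neg hb2]
  have hr : m + 1 - 2 = (m - 2) + 1 := by ring
  rw [hr, PySem.List.pyRange_one_succ_right (by omega : (1:Int) ≤ m - 2), List.map_append,
      List.sum_append]
  have hmap : (PySem.List.pyRange 1 (m - 2) 1).map (fun i => pvProdA (3 + i) (m + 1))
      = (PySem.List.pyRange 1 (m - 2) 1).map (fun i => pvProdA (3 + i) m * m) := by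
    apply List.map_congr_left
    intro i hi
    rw [PySem.List.mem_pyRange_one] at hi
    exact pvProdA_succ _ _ (by omega)
  rw [hmap]
  have h2 : 3 + (m - 2) = m + 1 := by ring
  simp only [List.map_cons, List.map_nil, List.sum_cons, List.sum_nil, h2]
  rw [pvProdA_self, pvProdA_succ 3 m (by omega)]
  rw [List.sum_map_mul_right]
  ring

lemma gA_eq (m : Int) : gA m = gZ m := by
  rcases lt_or_ge m 3 with hm | hm
  · rcases lt_or_ge m 1 with h0 | h1
    · unfold gA gZ
      rw [if_neg (by omega), if_pos (by omega),
          PySem.List.pyRange_one_eq_nil (by omega : m - 2 ≤ 1),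
          show pvProdA 3 m = 1 from by
            unfold pvProdA; rw [PySem.List.pyRange_one_eq_nil (by omega)]; rfl]
      simp
    · interval_cases m <;> decide
  · obtain ⟨k, hk⟩ : ∃ k : Nat, m = 3 + (k : Int) := ⟨(m - 3).toNat, by omega⟩
    subst hk
    clear hm
    induction k with
    | zero => decide
    | succ k ih =>
      have : (3 : Int) + (k + 1 : Nat) = (3 + (k : Int)) + 1 := by push_cast; ring
      rw [this, gA_succ _ (by omega), gZ_succ _ (by omega), ih]

lemma gTable_eq (n : Int) :
    gTableB n = ((List.range ((max n 1).toNat + 1)).map (fun k : Nat => gZ (k : Int)), gZ (max n 1)) := by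
  by_cases hn : n ≤ 1
  · have h1 : max n 1 = 1 := by omega
    unfold gTableB
    rw [PySem.List.pyRange_one_eq_nil (by omega : n + 1 ≤ 2), h1]
    decide
  · have h2 : 2 ≤ n := by omega
    induction n, h2 using Int.le_induction with
    | base => unfold gTableB; decide
    | succ n hn ih =>
      have hmax : max n 1 = n := by omega
      have hmax' : max (n + 1) 1 = n + 1 := by omega
      unfold gTableB at ih ⊢
      rw [PySem.List.pyRange_one_succ_right (by omega : (2:Int) ≤ n + 1),
          List.foldl_append, ih (by omega), hmax, hmax']
      simp only [List.foldl_cons, List.foldl_nil]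
      have hv : (n + 1 - 1) * gZ n + 1 = gZ (n + 1) := by
        rw [gZ_succ n (by omega)]; ring
      rw [hv]
      have hnat : (n + 1).toNat = n.toNat + 1 := by omega
      rw [hnat, List.range_succ, List.map_append]
      have e2 : ((n.toNat + 1 : Nat) : Int) = n + 1 := by omega
      simp [List.range_succ, e2, show ((n.toNat : Nat) : Int) = n from by omega]

lemma gv_eq (n m : Int) (h : m ≤ max n 1) : gvB (gTableB n).1 m = gZ m := by
  unfold gvB
  split
  · rename_i hm
    rw [gTable_eq]
    simp only
    rw [PySem.List.pyGet?_of_nonneg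
      (xs := (List.range ((max n 1).toNat + 1)).map (fun k : Nat => gZ (k : Int)))
      (i := m) (by omega)]
    have hlt : m.toNat < ((max n 1).toNat + 1) := by omega
    rw [List.getElem?_map, List.getElem?_range (by simpa using hlt)]
    simp only [Option.map_some, Option.getD_some]
    congr 1
    omega
  · rename_i hm
    unfold gZ
    rw [if_pos (by omega)]

lemma depthAux_eq (c : Int) (G : List Int) (Hgv : ∀ m, m ≤ c → gvB G m = gZ m) :
    ∀ n i d, n - 1 ≤ c →
      depthAuxB G n (PySem.Int.mod (i - 1) (gvB G (n - 1))) d = d + depthA n i := by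
  suffices H : ∀ K : Nat, ∀ n i d, (n - 3).toNat ≤ K → n - 1 ≤ c →
      depthAuxB G n (PySem.Int.mod (i - 1) (gvB G (n - 1))) d = d + depthA n i by
    intro n i d h
    exact H (n - 3).toNat n i d le_rfl h
  intro K
  induction K with
  | zero =>
    intro n i d hK hc
    have hn3 : n ≤ 3 := by omega
    rw [depthAuxB, depthA]
    rw [if_neg (by omega), if_neg (by simp; omega)]
    omega
  | succ K ih =>
    intro n i d hK hc
    have hg : gvB G (n - 1) = gA (n - 1) := by rw [Hgv _ (by omega), gA_eq]
    rw [depthAuxB, depthA, hg]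
    by_cases hcnd : PySem.Int.mod (i - 1) (gA (n - 1)) ≠ 0 ∧ 3 < n
    · rw [if_pos hcnd, if_pos hcnd]
      have harg : (n : Int) - 2 = (n - 1) - 1 := by ring
      rw [harg, ih (n - 1) (PySem.Int.mod (i - 1) (gA (n - 1))) (d + 1) (by omega) (by omega)]
      ring
    · rw [if_neg hcnd, if_neg hcnd]
      omega

lemma depthA_nonneg : ∀ n i : Int, 0 ≤ depthA n i := by
  suffices H : ∀ K : Nat, ∀ n i : Int, (n - 3).toNat ≤ K → 0 ≤ depthA n i by
    intro n i; exact H (n - 3).toNat n i le_rfl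
  intro K
  induction K with
  | zero =>
    intro n i hK
    rw [depthA, if_neg (by simp; omega)]
  | succ K ih =>
    intro n i hK
    rw [depthA]
    split
    · rename_i hcnd
      have := ih (n - 1) (PySem.Int.mod (i - 1) (gA (n - 1))) (by omega)
      omega
    · omega

lemma normTo_eq (c : Int) (G : List Int) (Hgv : ∀ m, m ≤ c → gvB G m = gZ m) :
    ∀ n j t : Int, t ≤ n → n ≤ c →
      normalize_toA n j t = some (normToB G n j t) := by
  suffices H : ∀ K : Nat, ∀ n j t : Int, (n - t).toNat ≤ K → t ≤ n → n ≤ c →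
      normalize_toA n j t = some (normToB G n j t) by
    intro n j t h1 h2
    exact H (n - t).toNat n j t le_rfl h1 h2
  intro K
  induction K with
  | zero =>
    intro n j t hK ht hc
    have hnt : n = t := by omega
    subst hnt
    rw [normalize_toA, if_neg (by omega), if_pos rfl]
    rw [normToB, if_pos le_rfl, normToB, if_neg (by omega)]
    have hg : gvB G n = gA n := by rw [Hgv _ (by omega), gA_eq]
    rw [hg]
    unfold normalizeA
    have := PySem.Int.floordiv_mul_add_mod (j - 1) (gA n)
    simp only [Option.some.injEq]
    omega
  | succ K ih =>
    intro n j t hK ht hc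
    by_cases hnt : n = t
    · subst hnt
      rw [normalize_toA, if_neg (by omega), if_pos rfl]
      rw [normToB, if_pos le_rfl, normToB, if_neg (by omega)]
      have hg : gvB G n = gA n := by rw [Hgv _ (by omega), gA_eq]
      rw [hg]
      unfold normalizeA
      have := PySem.Int.floordiv_mul_add_mod (j - 1) (gA n)
      simp only [Option.some.injEq]
      omega
    · have hlt : t < n := by omega
      rw [normalize_toA, if_neg (by omega), if_neg hnt]
      rw [normToB, if_pos (by omega)]
      have hg : gvB G n = gA n := by rw [Hgv _ (by omega), gA_eq]
      rw [hg]
      have harg : PySem.Int.mod (j - 1) (gA n) + 1 = normalizeA n j := by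
        unfold normalizeA
        have := PySem.Int.floordiv_mul_add_mod (j - 1) (gA n)
        omega
      rw [harg]
      exact ih (n - 1) (normalizeA n j) t (by omega) (by omega) (by omega)

-- ===== VERDICT (by name: the statement is the Claim_ definition above) =====
theorem generate_transform_indices_spec : Claim_equal_generate_transform_indices := by
  intro n i _ _
  unfold Spec_generate_transform_indices
  unfold generate_transform_indices generate_transform_indices_alt
  by_cases hi : i < 1
  · rw [if_pos hi, if_pos hi]
  · rw [if_neg hi, if_neg hi]
    have Hgv : ∀ m, m ≤ max n 1 → gvB (gTableB n).1 m = gZ m := fun m hm => gv_eq n m hm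
    have hd : depthB (gTableB n).1 n i = depthA n i := by
      unfold depthB
      rw [depthAux_eq (max n 1) _ Hgv n i 0 (by omega)]
      ring
    have hd' : depthB (gTableB n).1 n (i - 1) = depthA n (i - 1) := by
      unfold depthB
      rw [depthAux_eq (max n 1) _ Hgv n (i - 1) 0 (by omega)]
      ring
    have hg1 : gvB (gTableB n).1 (n - 1) = gA (n - 1) := by
      rw [Hgv _ (by omega), gA_eq]
    simp only [hd, hd', hg1]
    by_cases hn4 : 4 < n
    · rw [if_pos hn4, if_pos hn4]
      congr 1
      congr 1
      · -- the middle segment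
        by_cases hd1 : 1 ≤ depthA n i
        · rw [if_pos hd1]
          apply List.map_congr_left
          intro k hk
          rw [PySem.List.mem_pyRange_one] at hk
          have hkn : k < n - 3 := by omega
          rw [normTo_eq (max n 1) _ Hgv n (i - (k - 1)) (n - k) (by omega) (by omega)]
          simp only [Option.getD_some]
          have : gvB (gTableB n).1 (n - k - 1) = gA (n - (k + 1)) := by
            rw [Hgv _ (by omega), gA_eq]
            congr 1
            ring
          rw [this]
        · rw [if_neg hd1]
          have hd0 : depthA n i = 0 := by
            have := depthA_nonneg n i
            omega
          rw [hd0]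
          rw [show min ((0:Int) + 1) (n - 3) = 1 from by omega,
              PySem.List.pyRange_one_eq_nil le_rfl, List.map_nil]
    · rw [if_neg hn4, if_neg hn4]
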